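-- pv_equiv track=rewrite | github.com/Jayhey/swtest_python | py_file/톱니바퀴.py | direction
-- ===== SOURCE A (Python) =====
-- def direction(tooth, rotation):
-- 	d = [0] * len(tooth)
-- 	r = rotation
-- 	# 해당 톱니 기준 오른쪽 톱니
-- 	d[r[0]] = r[1]
-- 	for i in range(r[0], len(tooth) - 1):
-- 		if tooth[i][2] != tooth[i + 1][6]:  # 극이 다를 경우
-- 			d[i + 1] = -d[i]
-- 		else:  # 극이 다를 경우
-- 			d[i + 1] = 0
-- 			break
-- 	# 해당 톱니 기준 왼쪽 톱니
-- 	for i in range(r[0], 0, -1):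
-- 		if tooth[i][6] != tooth[i - 1][2]:
-- 			d[i - 1] = -d[i]
-- 		else:
-- 			d[i - 1] = 0
-- 			break
-- 	return d
-- ===== SOURCE B (Python) =====
-- def direction(tooth, rotation):
--     n = len(tooth)
--     s, sign = rotation[0], rotation[1]
--     # extent of the connected run: advance while adjacent poles differ
--     R = s
--     while R + 1 < n and tooth[R][2] != tooth[R + 1][6]:
--         R += 1
--     L = s
--     while L - 1 >= 0 and tooth[L][6] != tooth[L - 1][2]:
--         L -= 1
--     # fill alternating signs over [L, R], everything else stays 0
--     return [(sign if (k - s) % 2 == 0 else -sign) if L <= k <= R else 0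
--             for k in range(n)]
-- ===== Notes on version B (the rewrite author's own statement) =====
-- stated objective: alternative
-- what changed: B replaces A's in-place threaded propagation (writing -d[i] into d[i+1]/d[i-1] with break) by two pure boundary scans that find the extent [L,R] of the connected run and one fill pass assigning alternating signs by parity of the distance to the pivot.
-- outside the precondition, e.g. on direction([[1, 1, 1], [0, 0, 0, 0, 0, 0, 0]], [1, 2]): A returns [-2, 2], B returns [-2, 2]; on direction([[1, 1, 1, 1, 0, 1, 0], [0, 1, 1, 1, 0, 1, 1]], [-2, -1]): A returns [-1, 0], B returns [0, 0]
import Mathlib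
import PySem

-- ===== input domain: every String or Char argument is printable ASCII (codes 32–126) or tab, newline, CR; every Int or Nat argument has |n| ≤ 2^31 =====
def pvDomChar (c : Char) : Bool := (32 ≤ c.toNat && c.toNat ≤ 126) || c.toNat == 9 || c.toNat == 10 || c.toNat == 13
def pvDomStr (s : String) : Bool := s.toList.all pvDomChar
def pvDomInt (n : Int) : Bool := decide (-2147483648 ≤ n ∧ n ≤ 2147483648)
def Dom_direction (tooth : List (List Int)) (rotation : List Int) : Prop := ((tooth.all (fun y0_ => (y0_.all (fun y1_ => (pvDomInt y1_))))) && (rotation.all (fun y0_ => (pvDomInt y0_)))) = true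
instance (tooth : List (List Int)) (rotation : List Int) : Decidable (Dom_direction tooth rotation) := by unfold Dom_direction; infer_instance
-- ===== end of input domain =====

-- B separates the work into two boundary scans (extent of the connected gear run) plus one
-- alternating fill pass, instead of A's in-place array threading with break; objective: alternative.


-- ===== PORT A =====
-- right loop: for i in range(r[0], len(tooth)-1): … break
def dirLoopR (tooth : List (List Int)) : List Int → List Int → List Int
  | [], d => d
  | i :: rest, d =>
    if PySem.List.pyGetD (PySem.List.pyGetD tooth i []) 2 0 ≠
       PySem.List.pyGetD (PySem.List.pyGetD tooth (i + 1) []) 6 0 then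
      dirLoopR tooth rest (PySem.List.pySetD d (i + 1) (-(PySem.List.pyGetD d i 0)))
    else
      PySem.List.pySetD d (i + 1) 0

-- left loop: for i in range(r[0], 0, -1): … break
def dirLoopL (tooth : List (List Int)) : List Int → List Int → List Int
  | [], d => d
  | i :: rest, d =>
    if PySem.List.pyGetD (PySem.List.pyGetD tooth i []) 6 0 ≠
       PySem.List.pyGetD (PySem.List.pyGetD tooth (i - 1) []) 2 0 then
      dirLoopL tooth rest (PySem.List.pySetD d (i - 1) (-(PySem.List.pyGetD d i 0)))
    else
      PySem.List.pySetD d (i - 1) 0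

def direction (tooth : List (List Int)) (rotation : List Int) : List Int :=
  let d0 := List.replicate tooth.length (0 : Int)
  let r0 := PySem.List.pyGetD rotation 0 0
  let r1 := PySem.List.pyGetD rotation 1 0
  let d1 := PySem.List.pySetD d0 r0 r1
  let d2 := dirLoopR tooth (PySem.List.pyRange r0 ((tooth.length : Int) - 1) 1) d1
  dirLoopL tooth (PySem.List.pyRange r0 0 (-1)) d2

-- ===== PORT B =====
-- while R + 1 < n and tooth[R][2] != tooth[R+1][6]: R += 1
def scanR (tooth : List (List Int)) (R : Int) : Int :=
  if h : R + 1 < (tooth.length : Int) ∧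
      PySem.List.pyGetD (PySem.List.pyGetD tooth R []) 2 0 ≠
      PySem.List.pyGetD (PySem.List.pyGetD tooth (R + 1) []) 6 0 then
    scanR tooth (R + 1)
  else R
termination_by ((tooth.length : Int) - R).toNat
decreasing_by have := h.1; omega

-- while L - 1 >= 0 and tooth[L][6] != tooth[L-1][2]: L -= 1
def scanL (tooth : List (List Int)) (L : Int) : Int :=
  if h : 0 ≤ L - 1 ∧
      PySem.List.pyGetD (PySem.List.pyGetD tooth L []) 6 0 ≠
      PySem.List.pyGetD (PySem.List.pyGetD tooth (L - 1) []) 2 0 then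
    scanL tooth (L - 1)
  else L
termination_by L.toNat
decreasing_by have := h.1; omega

def direction_alt (tooth : List (List Int)) (rotation : List Int) : List Int :=
  let n := (tooth.length : Int)
  let s := PySem.List.pyGetD rotation 0 0
  let sign := PySem.List.pyGetD rotation 1 0
  let R := scanR tooth s
  let L := scanL tooth s
  (PySem.List.pyRange 0 n 1).map (fun k =>
    if L ≤ k ∧ k ≤ R then (if PySem.Int.mod (k - s) 2 = 0 then sign else -sign) else 0)

-- ===== PRECONDITION & SPEC =====
-- Pre_ excludes (a) negative pivot indices, where A's value rests on Python's negative-index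
-- wraparound writes (a defensible-corner artefact B does not mimic), and (b) gear rows with
-- fewer than 7 pole entries (unless the single-gear case runs no loop), on which A raises
-- IndexError except when a pole match happens to stop the scan just before the short row.
def Pre_direction (tooth : List (List Int)) (rotation : List Int) : Prop :=
  2 ≤ rotation.length ∧ 0 ≤ rotation.getD 0 0 ∧ rotation.getD 0 0 < (tooth.length : Int) ∧
    (tooth.length = 1 ∨ ∀ row ∈ tooth, 7 ≤ row.length)
instance (tooth : List (List Int)) (rotation : List Int) : Decidable (Pre_direction tooth rotation) := by
  unfold Pre_direction; infer_instance

def pvWitness_direction : List (List Int) × List Int :=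
  ([[1, 0, 1, 0, 1, 0, 1, 0], [0, 0, 1, 1, 0, 0, 1, 1]], [0, 1])

def Spec_direction (tooth : List (List Int)) (rotation : List Int) (out : List Int) : Prop := out = direction_alt tooth rotation
instance (tooth : List (List Int)) (rotation : List Int) (out : List Int) : Decidable (Spec_direction tooth rotation out) := by unfold Spec_direction; infer_instance

-- ===== CLAIM (what is proved, stated in full; the proofs are below) =====
def Claim_equal_direction : Prop := ∀ (tooth : List (List Int)) (rotation : List Int), Dom_direction tooth rotation → Pre_direction tooth rotation → Spec_direction tooth rotation (direction tooth rotation)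

-- ===== LEMMAS AND PROOFS =====

-- pole accessors shared by the proofs (both ports write the expressions out)
def p2 (tooth : List (List Int)) (i : Int) : Int := PySem.List.pyGetD (PySem.List.pyGetD tooth i []) 2 0
def p6 (tooth : List (List Int)) (i : Int) : Int := PySem.List.pyGetD (PySem.List.pyGetD tooth i []) 6 0

-- what A's right loop writes after position i, given value x at i
def rrun (tooth : List (List Int)) (x : Int) (i : Int) : Nat → List Int
  | 0 => []
  | m + 1 =>
    if p2 tooth i ≠ p6 tooth (i + 1) then (-x) :: rrun tooth (-x) (i + 1) m
    else 0 :: List.replicate m 0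

-- what A's left loop writes before position j, given value x at j
def lrun (tooth : List (List Int)) (x : Int) : Nat → List Int
  | 0 => []
  | j + 1 =>
    if p6 tooth ((j : Int) + 1) ≠ p2 tooth (j : Int) then lrun tooth (-x) j ++ [-x]
    else List.replicate j 0 ++ [0]

theorem getD_mid (u t : List Int) (x d : Int) : (u ++ x :: t).getD u.length d = x := by
  simp [List.getD_eq_getElem?_getD]

theorem set_mid (u t : List Int) (x v : Int) : (u ++ x :: t).set u.length v = u ++ v :: t := by
  induction u with
  | nil => simp
  | cons a u ih => simp [ih]

theorem le_scanR (tooth : List (List Int)) (R : Int) : R ≤ scanR tooth R := by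
  fun_induction scanR with
  | case1 R h ih => omega
  | case2 R h => omega

theorem scanL_le (tooth : List (List Int)) (L : Int) : scanL tooth L ≤ L := by
  fun_induction scanL with
  | case1 L h ih => omega
  | case2 L h => omega

theorem loopR_eq (tooth : List (List Int)) :
    ∀ (m : Nat) (i : Int) (u : List Int) (x : Int), 0 ≤ i → u.length = i.toNat →
      i + m + 1 = (tooth.length : Int) →
      dirLoopR tooth (PySem.List.pyRange i ((tooth.length : Int) - 1) 1)
        (u ++ x :: List.replicate m 0) = u ++ x :: rrun tooth x i m := by
  intro m
  induction m with
  | zero =>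
    intro i u x h0 hu hn
    rw [PySem.List.pyRange_one_eq_nil (by omega)]
    simp [dirLoopR, rrun]
  | succ m ih =>
    intro i u x h0 hu hn
    have ei : i = ((u.length : Nat) : Int) := by omega
    rw [PySem.List.pyRange_one_cons (by omega)]
    simp only [dirLoopR, List.replicate_succ, rrun, p2, p6, ei]
    have hx : PySem.List.pyGetD (u ++ x :: (0:Int) :: List.replicate m 0) ((u.length : Nat) : Int) 0 = x := by
      rw [PySem.List.pyGetD_natCast]; exact getD_mid u _ x 0
    have e1 : ((u.length : Int) + 1) = (((u.length + 1 : Nat)) : Int) := by push_cast; ring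
    have hset : ∀ v : Int, PySem.List.pySetD (u ++ x :: (0 : Int) :: List.replicate m 0) ((u.length:Int)+1) v
        = (u ++ [x]) ++ v :: List.replicate m 0 := by
      intro v
      rw [e1, PySem.List.pySetD_natCast]
      have := set_mid (u ++ [x]) (List.replicate m 0) 0 v
      simpa using this
    rw [hx]
    split_ifs with hg
    · rw [hset]
      rw [ih ((u.length:Int)+1) (u ++ [x]) (-x) (by omega) (by simp) (by push_cast at hn ⊢; omega)]
      simp
    · rw [hset]
      simp

theorem loopL_eq (tooth : List (List Int)) :
    ∀ (j : Nat) (x : Int) (t : List Int),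
      dirLoopL tooth (PySem.List.pyRange (j : Int) 0 (-1))
        (List.replicate j 0 ++ x :: t) = lrun tooth x j ++ x :: t := by
  intro j
  induction j with
  | zero =>
    intro x t
    rw [PySem.List.pyRange_neg_one_eq_nil (by omega)]
    simp [dirLoopL, lrun]
  | succ j ih =>
    intro x t
    rw [PySem.List.pyRange_neg_one_cons (by push_cast; omega)]
    have ec : ((j + 1 : Nat) : Int) - 1 = ((j : Nat) : Int) := by push_cast; ring
    simp only [dirLoopL, lrun, p2, p6, ec]
    have hd : List.replicate (j+1) (0:Int) ++ x :: t
        = (List.replicate j 0 ++ [(0:Int)]) ++ x :: t := by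
      simp [List.replicate_succ']
    have hx : PySem.List.pyGetD (List.replicate (j+1) (0:Int) ++ x :: t) ((j+1 : Nat) : Int) 0 = x := by
      rw [hd, PySem.List.pyGetD_natCast]
      have := getD_mid (List.replicate j 0 ++ [(0:Int)]) t x 0
      simpa using this
    have hset : ∀ v : Int, PySem.List.pySetD (List.replicate (j+1) (0:Int) ++ x :: t) ((j:Nat):Int) v
        = List.replicate j 0 ++ v :: x :: t := by
      intro v
      rw [PySem.List.pySetD_natCast, List.replicate_succ']
      have := set_mid (List.replicate j (0:Int)) ([(0:Int)] ++ x :: t) 0 v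
      simpa using this
    rw [hx]
    have ej : ((j + 1 : Nat) : Int) = ((j : Nat) : Int) + 1 := by push_cast; ring
    rw [ej]
    split_ifs with hg
    · rw [hset, ih (-x) (x :: t)]
      simp
    · rw [hset]
      simp

theorem rrun_eq (tooth : List (List Int)) :
    ∀ (m : Nat) (i x : Int), i + m + 1 = (tooth.length : Int) →
      rrun tooth x i m = (List.range m).map (fun (j : Nat) =>
        if i + 1 + (j : Int) ≤ scanR tooth i then (if j % 2 = 1 then x else -x) else 0) := by
  intro m
  induction m with
  | zero => intro i x hn; simp [rrun]
  | succ m ih =>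
    intro i x hn
    by_cases hg : p2 tooth i ≠ p6 tooth (i + 1)
    · have hs : scanR tooth i = scanR tooth (i + 1) := by
        rw [scanR, dif_pos ⟨by omega, by simpa [p2, p6] using hg⟩]
      have h1 : i + 1 ≤ scanR tooth (i + 1) := le_trans (by omega) (le_scanR tooth (i + 1))
      rw [rrun, if_pos hg, hs, List.range_succ_eq_map,
        ih (i + 1) (-x) (by push_cast at hn ⊢; omega)]
      simp only [List.map_cons, List.map_map]
      congr 1
      · rw [if_pos (by push_cast; omega)]
        norm_num
      · apply List.map_congr_left
        intro j hj
        simp only [Function.comp, Nat.succ_eq_add_one]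
        push_cast
        split_ifs <;> (try rfl) <;> (try simp) <;> (exfalso; omega)
    · have hs : scanR tooth i = i := by
        rw [scanR, dif_neg]
        intro h; exact hg (by simpa [p2, p6] using h.2)
      rw [rrun, if_neg hg, hs]
      symm
      rw [show (0 : Int) :: List.replicate m 0 = List.replicate (m + 1) 0 from rfl]
      refine List.eq_replicate_iff.mpr ⟨by simp, ?_⟩
      intro b hb
      simp only [List.mem_map, List.mem_range] at hb
      obtain ⟨j, hj, rfl⟩ := hb
      rw [if_neg (by push_cast; omega)]

theorem lrun_eq (tooth : List (List Int)) :
    ∀ (j : Nat) (x : Int),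
      lrun tooth x j = (List.range j).map (fun (k : Nat) =>
        if scanL tooth (j : Int) ≤ (k : Int) then (if (j - k) % 2 = 0 then x else -x) else 0) := by
  intro j
  induction j with
  | zero => intro x; simp [lrun]
  | succ j ih =>
    intro x
    have c1 : ((j + 1 : Nat) : Int) = (j : Int) + 1 := by push_cast; ring
    by_cases hg : p6 tooth ((j : Int) + 1) ≠ p2 tooth (j : Int)
    · have hs : scanL tooth ((j + 1 : Nat) : Int) = scanL tooth (j : Int) := by
        rw [c1, scanL, dif_pos ⟨by omega, by simpa [p2, p6] using hg⟩]
        norm_num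
      have h1 : scanL tooth (j : Int) ≤ (j : Int) := scanL_le tooth (j : Int)
      rw [lrun, if_pos hg, List.range_succ, List.map_append, ih (-x), hs]
      congr 1
      · apply List.map_congr_left
        intro k hk
        simp only [List.mem_range] at hk
        split_ifs <;> (try rfl) <;> (try simp) <;> (exfalso; omega)
      · simp only [List.map_cons, List.map_nil]
        rw [if_pos (by omega), if_neg (by omega)]
    · have hs : scanL tooth ((j + 1 : Nat) : Int) = (j : Int) + 1 := by
        rw [c1, scanL, dif_neg]
        intro h; exact hg (by simpa [p2, p6] using h.2)
      rw [lrun, if_neg hg, hs]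
      symm
      rw [show List.replicate j (0 : Int) ++ [0] = List.replicate (j + 1) 0 from List.replicate_succ'.symm]
      refine List.eq_replicate_iff.mpr ⟨by simp, ?_⟩
      intro b hb
      simp only [List.mem_map, List.mem_range] at hb
      obtain ⟨k, hk, rfl⟩ := hb
      rw [if_neg (by push_cast; omega)]

theorem replicate_split (n s m : Nat) (h : n = s + 1 + m) :
    List.replicate n (0 : Int) = List.replicate s 0 ++ (0 : Int) :: List.replicate m 0 := by
  subst h
  rw [List.replicate_add, List.replicate_add]
  simp

-- ===== VERDICT (by name: the statement is the Claim_ definition above) =====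
theorem direction_spec : Claim_equal_direction := by
  intro tooth rotation _ hpre
  obtain ⟨-, h0, hlt, -⟩ := hpre
  unfold Spec_direction
  simp only [direction, direction_alt]
  rw [← PySem.List.pyGetD_zero rotation (0 : Int)] at h0 hlt
  set r0 := PySem.List.pyGetD rotation 0 0 with hr0
  set v := PySem.List.pyGetD rotation 1 0 with hv
  set n := tooth.length with hnn
  set s := r0.toNat with hsdef
  have hs : r0 = ((s : Nat) : Int) := by omega
  have hn : n = s + 1 + (n - 1 - s) := by omega
  set m := n - 1 - s with hm
  have hd1 : PySem.List.pySetD (List.replicate n (0 : Int)) r0 v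
      = List.replicate s 0 ++ v :: List.replicate m 0 := by
    rw [hs, PySem.List.pySetD_natCast, replicate_split n s m hn]
    simpa using set_mid (List.replicate s 0) (List.replicate m 0) 0 v
  rw [hd1, hs]
  rw [loopR_eq tooth m (s : Int) (List.replicate s 0) v (by omega) (by simp) (by omega)]
  rw [loopL_eq tooth s v _]
  rw [PySem.List.pyRange_zero_nat n, List.map_map]
  rw [show List.range n = List.range (s + 1 + m) from by rw [← hn]]
  rw [List.range_add, List.range_succ]
  simp only [List.map_append, List.map_cons, List.map_nil, List.map_map]
  rw [List.append_assoc]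
  have hLs : scanL tooth (s : Int) ≤ (s : Int) := scanL_le tooth (s : Int)
  have hRs : (s : Int) ≤ scanR tooth (s : Int) := le_scanR tooth (s : Int)
  congr 1
  · -- left part: lrun vs fill on [0, s)
    rw [lrun_eq tooth s v]
    apply List.map_congr_left
    intro k hk
    simp only [List.mem_range] at hk
    simp only [Function.comp_apply, PySem.Int.mod_eq_zero_iff_dvd]
    by_cases hL : scanL tooth (s : Int) ≤ (k : Int)
    · have hc : scanL tooth (s : Int) ≤ ((k : Nat) : Int) ∧ ((k : Nat) : Int) ≤ scanR tooth (s : Int) := ⟨hL, by omega⟩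
      rw [if_pos hL, if_pos hc]
      split_ifs <;> (try rfl) <;> (exfalso; omega)
    · rw [if_neg hL, if_neg (by intro h; exact hL h.1)]
  · -- pivot and right part
    simp only [List.cons_append, List.nil_append, Function.comp_apply,
      PySem.Int.mod_eq_zero_iff_dvd]
    congr 1
    · have hc : scanL tooth (s : Int) ≤ ((s : Nat) : Int) ∧ ((s : Nat) : Int) ≤ scanR tooth (s : Int) := ⟨hLs, hRs⟩
      rw [if_pos hc, if_pos (show (2 : Int) ∣ (s : Int) - (s : Int) from by omega)]
    · rw [rrun_eq tooth m (s : Int) v (by omega)]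
      apply Eq.symm
      apply List.map_congr_left
      intro j hj
      simp only [List.mem_range] at hj
      simp only [Function.comp_apply, PySem.Int.mod_eq_zero_iff_dvd]
      by_cases hR : (s : Int) + 1 + (j : Int) ≤ scanR tooth (s : Int)
      · have hc : scanL tooth (s : Int) ≤ ((s + 1 + j : Nat) : Int) ∧ ((s + 1 + j : Nat) : Int) ≤ scanR tooth (s : Int) := ⟨by push_cast; omega, by push_cast; omega⟩
        rw [if_pos hc, if_pos hR]
        split_ifs <;> (try rfl) <;> (exfalso; omega)
      · rw [if_neg hR, if_neg (by push_cast; omega)]
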